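-- pv_equiv track=rewrite | github.com/alswl0120/Diagnostic-App | assessment/session.py | get_flat_index
-- ===== SOURCE A (Python) =====
-- def get_flat_index(ordered_items: list, domain: str, item_index_in_domain: int) -> int:
--     count = 0
--     for item in ordered_items:
--         if item["domain"] == domain:
--             if item_index_in_domain == 0:
--                 return count
--             item_index_in_domain -= 1
--         count += 1
--     return -1
-- ===== SOURCE B (Python) =====
-- def get_flat_index(ordered_items: list, domain: str, item_index_in_domain: int) -> int:
--     positions = [i for i, item in enumerate(ordered_items) if item["domain"] == domain]
--     if 0 <= item_index_in_domain < len(positions):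
--         return positions[item_index_in_domain]
--     return -1
-- ===== Notes on version B (the rewrite author's own statement) =====
-- stated objective: simpler
-- what changed: Collect-then-select: build the list of absolute positions of all items in the domain once, then answer by a single bounds-checked index, replacing A's interleaved running counter, decrementing index and early return.
-- outside the precondition, e.g. on get_flat_index([{'domain': 'x'}, {}], 'x', 0): A returns 0, B raises KeyError
import Mathlib
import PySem

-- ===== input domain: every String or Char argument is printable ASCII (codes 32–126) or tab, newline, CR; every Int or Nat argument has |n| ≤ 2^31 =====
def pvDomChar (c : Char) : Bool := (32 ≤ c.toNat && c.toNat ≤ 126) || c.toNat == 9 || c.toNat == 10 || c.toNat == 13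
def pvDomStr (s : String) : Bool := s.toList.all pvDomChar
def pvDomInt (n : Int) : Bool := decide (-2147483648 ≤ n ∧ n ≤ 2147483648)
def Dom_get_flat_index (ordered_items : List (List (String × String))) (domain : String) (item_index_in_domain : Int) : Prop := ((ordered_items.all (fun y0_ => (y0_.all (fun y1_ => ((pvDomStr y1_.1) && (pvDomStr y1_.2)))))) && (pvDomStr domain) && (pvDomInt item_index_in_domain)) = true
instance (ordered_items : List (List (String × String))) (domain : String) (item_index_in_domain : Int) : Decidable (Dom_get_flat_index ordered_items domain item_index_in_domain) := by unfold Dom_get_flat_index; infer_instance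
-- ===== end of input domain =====

-- B builds the position table of all items in the domain once, then answers by one bounds-checked
-- index; same O(n) cost, replaces A's running counter / decrement / early return (objective: simpler).

-- ===== PORT A =====
-- loop over the items keeping 'count' and the remaining 'item_index_in_domain'
def pvGoA : List (List (String × String)) → String → Int → Int → Int
  | [], _, _, _ => -1
  | item :: rest, domain, k, count =>
    if (((PySem.Dict.mk item).get? "domain").getD "") == domain then
      if k == 0 then count
      else pvGoA rest domain (k - 1) (count + 1)
    else pvGoA rest domain k (count + 1)

def get_flat_index (ordered_items : List (List (String × String))) (domain : String) (item_index_in_domain : Int) : Int :=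
  pvGoA ordered_items domain item_index_in_domain 0

-- ===== PORT B =====
def get_flat_index_alt (ordered_items : List (List (String × String))) (domain : String) (item_index_in_domain : Int) : Int :=
  let positions := ((PySem.List.enumerate ordered_items 0).filter
      (fun p => (((PySem.Dict.mk p.2).get? "domain").getD "") == domain)).map (fun p => p.1)
  if 0 ≤ item_index_in_domain ∧ item_index_in_domain < positions.length then
    (PySem.List.pyGet? positions item_index_in_domain).getD (-1)
  else -1

-- ===== PRECONDITION & SPEC =====
-- Pre_ excludes inputs containing an item without a "domain" key: Python A raises KeyError when it
-- scans such an item, and B raises KeyError whenever any such item is present (so neither value is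
-- claimable there).  This is slightly narrower than A's returning domain: A may return early before
-- reaching a malformed item (see the cite in claim.json).
def Pre_get_flat_index (ordered_items : List (List (String × String))) (domain : String) (item_index_in_domain : Int) : Prop :=
  ordered_items.all (fun item => ((PySem.Dict.mk item).get? "domain").isSome) = true
instance (ordered_items : List (List (String × String))) (domain : String) (item_index_in_domain : Int) : Decidable (Pre_get_flat_index ordered_items domain item_index_in_domain) := by unfold Pre_get_flat_index; infer_instance

def pvWitness_get_flat_index : (List (List (String × String))) × String × Int :=
  ([[("domain", "x")], [("domain", "y")], [("domain", "x")]], "x", 1)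

def Spec_get_flat_index (ordered_items : List (List (String × String))) (domain : String) (item_index_in_domain : Int) (out : Int) : Prop := out = get_flat_index_alt ordered_items domain item_index_in_domain
instance (ordered_items : List (List (String × String))) (domain : String) (item_index_in_domain : Int) (out : Int) : Decidable (Spec_get_flat_index ordered_items domain item_index_in_domain out) := by unfold Spec_get_flat_index; infer_instance

-- ===== CLAIM (what is proved, stated in full; the proofs are below) =====
def Claim_equal_get_flat_index : Prop := ∀ (ordered_items : List (List (String × String))) (domain : String) (item_index_in_domain : Int), Dom_get_flat_index ordered_items domain item_index_in_domain → Pre_get_flat_index ordered_items domain item_index_in_domain → Spec_get_flat_index ordered_items domain item_index_in_domain (get_flat_index ordered_items domain item_index_in_domain)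

-- ===== LEMMAS AND PROOFS =====

-- Loop invariant: A's loop started at counter s computes exactly B's bounds-checked lookup in the
-- position table of the remaining items enumerated from s.
theorem pvGoA_eq (items : List (List (String × String))) (domain : String) :
    ∀ (k s : Int),
      pvGoA items domain k s =
        (let ps := ((PySem.List.enumerate items s).filter
            (fun p => (((PySem.Dict.mk p.2).get? "domain").getD "") == domain)).map (fun p => p.1)
         if 0 ≤ k ∧ k < ps.length then (PySem.List.pyGet? ps k).getD (-1) else -1) := by
  induction items with
  | nil =>
      intro k s
      simp [pvGoA, PySem.List.enumerate_nil]
  | cons item rest ih =>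
      intro k s
      rw [PySem.List.enumerate_cons]
      by_cases hm : ((((PySem.Dict.mk item).get? "domain").getD "") == domain) = true
      · simp only [List.filter_cons, hm, if_true, List.map_cons]
        set ps := ((PySem.List.enumerate rest (s + 1)).filter
            (fun p => (((PySem.Dict.mk p.2).get? "domain").getD "") == domain)).map (fun p => p.1) with hps
        by_cases hk : k = 0
        · subst hk
          have hcond : (0:Int) ≤ 0 ∧ (0:Int) < ((s :: ps).length : Int) :=
            ⟨le_refl 0, by exact_mod_cast Nat.succ_pos ps.length⟩
          simp only [pvGoA, hm, if_true, beq_self_eq_true, if_pos hcond,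
            PySem.List.pyGet?_zero_cons, Option.getD_some]
        · have hk' : (k == 0) = false := by simp [hk]
          simp only [pvGoA, hm, if_true, hk', Bool.false_eq_true, if_false]
          rw [ih (k - 1) (s + 1)]
          simp only [← hps]
          by_cases hr : 0 ≤ k - 1 ∧ k - 1 < (ps.length : Int)
          · have hcond : 0 ≤ k ∧ k < ((s :: ps).length : Int) := by
              simp only [List.length_cons]; push_cast; omega
            rw [if_pos hr, if_pos hcond,
              PySem.List.pyGet?_of_nonneg ps hr.1,
              PySem.List.pyGet?_of_nonneg (s :: ps) hcond.1]
            have htn : k.toNat = (k - 1).toNat + 1 := by omega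
            rw [htn, List.getElem?_cons_succ]
          · have hcond : ¬ (0 ≤ k ∧ k < ((s :: ps).length : Int)) := by
              simp only [List.length_cons]; push_cast; push_cast at hr; omega
            rw [if_neg hr, if_neg hcond]
      · have hm' : ((((PySem.Dict.mk item).get? "domain").getD "") == domain) = false := by
          simpa using hm
        simp only [pvGoA, hm', Bool.false_eq_true, if_false, List.filter_cons]
        exact ih k (s + 1)

-- ===== VERDICT (by name: the statement is the Claim_ definition above) =====
theorem get_flat_index_spec : Claim_equal_get_flat_index := by
  intro items domain k _ _
  unfold Spec_get_flat_index get_flat_index get_flat_index_alt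
  exact pvGoA_eq items domain k 0
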